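-- pv_equiv track=rewrite | github.com/Angela-Park-JE/TIL_ver1 | python3/algorithm_programmers/075_수 조작하기1.py | solution
-- ===== SOURCE A (Python) =====
-- def solution(n, control):
--     while len(control) != 0:
--         direction = control[0]
--         if direction == 'w':
--             n += 1
--         elif direction == 's':
--             n -= 1
--         elif direction == 'd':
--             n += 10
--         else:
--             n -= 10
--         control = control[1:]
--
--     return n
-- ===== SOURCE B (Python) =====
-- def solution(n, control):
--     w = control.count('w')
--     s = control.count('s')
--     d = control.count('d')
--     return n + w - s + 10 * d - 10 * (len(control) - w - s - d)
-- ===== Notes on version B (the rewrite author's own statement) =====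
-- stated objective: faster
-- what changed: Replaced the sequential character-by-character loop (with repeated string slicing) by a closed-form arithmetic expression over character counts: n + count('w') - count('s') + 10*count('d') - 10*(remaining characters), reproducing A's else catch-all via len minus the three counts.
import Mathlib
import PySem

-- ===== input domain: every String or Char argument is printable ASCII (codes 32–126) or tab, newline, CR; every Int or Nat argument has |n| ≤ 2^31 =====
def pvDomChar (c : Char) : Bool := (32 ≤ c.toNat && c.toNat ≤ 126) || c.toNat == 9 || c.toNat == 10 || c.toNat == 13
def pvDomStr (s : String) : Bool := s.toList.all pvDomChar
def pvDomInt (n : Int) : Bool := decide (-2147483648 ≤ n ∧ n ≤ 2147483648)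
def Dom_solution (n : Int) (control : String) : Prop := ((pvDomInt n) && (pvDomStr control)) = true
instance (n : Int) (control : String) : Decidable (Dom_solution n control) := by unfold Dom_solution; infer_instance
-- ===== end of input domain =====

-- B replaces A's sequential while-loop by a closed-form expression over character counts (simpler, no loop).

-- ===== PORT A =====
-- A's while-loop: read control[0], update n, drop to control[1:]; structural recursion on the char list.
def solutionLoop (n : Int) : List Char → Int
  | [] => n
  | c :: rest =>
      solutionLoop (if c = 'w' then n + 1 else if c = 's' then n - 1
                    else if c = 'd' then n + 10 else n - 10) rest

def solution (n : Int) (control : String) : Int := solutionLoop n control.toList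

-- ===== PORT B =====
def solution_alt (n : Int) (control : String) : Int :=
  let w : Int := PySem.Str.count control "w"
  let s : Int := PySem.Str.count control "s"
  let d : Int := PySem.Str.count control "d"
  n + w - s + 10 * d - 10 * ((PySem.Str.len control : Int) - w - s - d)

-- ===== PRECONDITION & SPEC =====
def Spec_solution (n : Int) (control : String) (out : Int) : Prop := out = solution_alt n control
instance (n : Int) (control : String) (out : Int) : Decidable (Spec_solution n control out) := by unfold Spec_solution; infer_instance

-- ===== CLAIM (what is proved, stated in full; the proofs are below) =====
def Claim_equal_solution : Prop := ∀ (n : Int) (control : String), Dom_solution n control → Spec_solution n control (solution n control)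

-- ===== LEMMAS AND PROOFS =====

lemma count_go_singleton (c : Char) (fuel : Nat) (l : List Char) (acc : Nat)
    (h : l.length ≤ fuel) :
    PySem.Chars.count.go [c] fuel l acc = acc + l.count c := by
  induction fuel generalizing l acc with
  | zero =>
      have : l = [] := List.eq_nil_of_length_eq_zero (Nat.le_zero.mp h)
      subst this; simp [PySem.Chars.count.go]
  | succ fuel ih =>
      cases l with
      | nil => simp [PySem.Chars.count.go]
      | cons x xs =>
          simp only [PySem.Chars.count.go, List.isPrefixOf, List.count_cons]
          by_cases hx : c = x
          · subst hx
            simp only [BEq.rfl, Bool.true_and, if_true]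
            rw [List.length_singleton, List.drop_one, List.tail_cons,
              ih xs (acc + 1) (by simpa using Nat.lt_succ_iff.mp (by simpa using h))]
            omega
          · have hbe : (c == x) = false := by simp [hx]
            simp only [hbe, Bool.false_and, Bool.false_eq_true, if_false]
            rw [ih xs acc (by simpa using Nat.lt_succ_iff.mp (by simpa using h))]
            have hxc : (x == c) = false := by simp [Ne.symm hx]
            simp [hxc]

lemma chars_count_singleton (c : Char) (l : List Char) :
    PySem.Chars.count l [c] = l.count c := by
  simpa using count_go_singleton c l.length l 0 (Nat.le_refl _)

lemma solutionLoop_closed (n : Int) (l : List Char) :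
    solutionLoop n l =
      n + (l.count 'w' : Int) - (l.count 's' : Int) + 10 * (l.count 'd' : Int)
        - 10 * ((l.length : Int) - (l.count 'w' : Int) - (l.count 's' : Int) - (l.count 'd' : Int)) := by
  induction l generalizing n with
  | nil => simp [solutionLoop]
  | cons c rest ih =>
      simp only [solutionLoop, ih, List.count_cons, List.length_cons]
      by_cases hw : c = 'w' <;> by_cases hs : c = 's' <;> by_cases hd : c = 'd' <;>
        simp_all <;> ring

-- ===== VERDICT (by name: the statement is the Claim_ definition above) =====
theorem solution_spec : Claim_equal_solution := by
  intro n control _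
  unfold Spec_solution solution solution_alt
  have hw : ("w" : String).toList = ['w'] := rfl
  have hs : ("s" : String).toList = ['s'] := rfl
  have hd : ("d" : String).toList = ['d'] := rfl
  simp only [PySem.Str.count_eq, PySem.Str.len_eq, hw, hs, hd, chars_count_singleton]
  rw [solutionLoop_closed]
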